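-- pv_equiv track=rewrite | github.com/sigilpunk/Milatro | jokerCanvasGen.py | optimal_grid
-- ===== SOURCE A (Python) =====
-- import math
--
-- def optimal_grid(J: int):
--     best = None
--     for W in range(1, J + 1):
--         H = math.ceil(J / W)
--         area = W * H
--         score = area - J + abs(W - H)
--         if not best or score < best[0]:
--             best = (score, W, H)
--     return tuple([best[1], best[2]])
-- ===== SOURCE B (Python) =====
-- import math
--
-- def optimal_grid(J: int):
--     # Seed with the W = 1 candidate (H = J, score = J - 1), then scan only
--     # W = 2 .. min(J, isqrt(J) + 1): any wider grid scores no better than the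
--     # grid with its height as width, so the optimum (smallest W on ties) lies there.
--     best_w, best_h, best_score = 1, J, J - 1
--     for W in range(2, min(J, math.isqrt(J) + 1) + 1):
--         H = -(-J // W)
--         score = W * H - J + abs(W - H)
--         if score < best_score:
--             best_w, best_h, best_score = W, H, score
--     return (best_w, best_h)
-- ===== Notes on version B (the rewrite author's own statement) =====
-- stated objective: faster
-- what changed: B seeds the best with the W=1 candidate and scans only W = 2..min(J, isqrt(J)+1) with integer ceiling division, instead of A's scan of all W = 1..J with float math.ceil: a grid wider than isqrt(J)+1 never scores better than the grid whose width is its height, so the optimum (smallest W on ties) lies in that prefix.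
-- outside the precondition, e.g. on optimal_grid(0): A raises TypeError, B returns (1, 0)
import Mathlib
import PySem

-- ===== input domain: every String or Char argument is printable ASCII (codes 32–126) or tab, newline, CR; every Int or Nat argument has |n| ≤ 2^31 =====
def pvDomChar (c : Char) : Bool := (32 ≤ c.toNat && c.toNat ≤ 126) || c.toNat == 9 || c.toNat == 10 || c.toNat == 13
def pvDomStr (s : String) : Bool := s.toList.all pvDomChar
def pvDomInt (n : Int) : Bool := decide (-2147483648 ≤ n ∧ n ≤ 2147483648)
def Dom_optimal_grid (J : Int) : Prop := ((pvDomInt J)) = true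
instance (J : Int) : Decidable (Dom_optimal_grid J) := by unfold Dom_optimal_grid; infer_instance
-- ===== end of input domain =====

-- B changes the scan range from W = 1..J to W = 1..min(J, isqrt(J)+1) (objective: faster, asymptotic).

-- ===== PORT A =====
-- math.ceil(J / W) is ported as integer ceiling division -((-J) // W): exact here since |J| ≤ 2^31 < 2^53,
-- so the float division J / W rounds to a value with the same ceiling.
def optimal_grid (J : Int) : List Int :=
  let best := (PySem.List.pyRange 1 (J + 1) 1).foldl
    (fun best W =>
      let H := -(PySem.Int.floordiv (-J) W)
      let area := W * H
      let score := area - J + |W - H|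
      match best with
      | none => some (score, W, H)
      | some b => if score < b.1 then some (score, W, H) else best)
    (none : Option (Int × Int × Int))
  match best with
  | some b => [b.2.1, b.2.2]
  | none => []   -- Python raises TypeError here (only when J ≤ 0); excluded by Pre_

-- ===== PORT B =====
-- state is (best_w, best_h, best_score), seeded with the W = 1 candidate; -(-J // W) is integer ceiling division
def optimal_grid_alt (J : Int) : List Int :=
  let r := (PySem.List.pyRange 2 (min J ((Int.toNat J).sqrt + 1) + 1) 1).foldl
    (fun b W =>
      let H := -(PySem.Int.floordiv (-J) W)
      let score := W * H - J + |W - H|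
      if score < b.2.2 then (W, H, score) else b)
    ((1, J, J - 1) : Int × Int × Int)
  [r.1, r.2.1]

-- ===== PRECONDITION & SPEC =====
-- A raises TypeError for J ≤ 0 (the loop never runs, best stays None, best[1] fails); Pre_ excludes exactly that.
def Pre_optimal_grid (J : Int) : Prop := 1 ≤ J
instance (J : Int) : Decidable (Pre_optimal_grid J) := by unfold Pre_optimal_grid; infer_instance
def pvWitness_optimal_grid : Int := 12

def Spec_optimal_grid (J : Int) (out : List Int) : Prop := out = optimal_grid_alt J
instance (J : Int) (out : List Int) : Decidable (Spec_optimal_grid J out) := by unfold Spec_optimal_grid; infer_instance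

-- ===== CLAIM (what is proved, stated in full; the proofs are below) =====
def Claim_equal_optimal_grid : Prop := ∀ (J : Int), Dom_optimal_grid J → Pre_optimal_grid J → Spec_optimal_grid J (optimal_grid J)

-- ===== LEMMAS AND PROOFS =====

-- ceiling division, score and the two loop bodies, as named functions for the proofs
def pvCdiv (J W : Int) : Int := -(PySem.Int.floordiv (-J) W)

def pvScore (J W : Int) : Int := W * pvCdiv J W - J + |W - pvCdiv J W|

def pvStep (J : Int) (b : Int × Int × Int) (W : Int) : Int × Int × Int :=
  if pvScore J W < b.2.2 then (W, pvCdiv J W, pvScore J W) else b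

def pvStepA (J : Int) (b : Option (Int × Int × Int)) (W : Int) : Option (Int × Int × Int) :=
  match b with
  | none => some (pvScore J W, W, pvCdiv J W)
  | some p => if pvScore J W < p.1 then some (pvScore J W, W, pvCdiv J W) else some p

lemma pvCdiv_bracket (J W : Int) (hW : 0 < W) :
    (pvCdiv J W - 1) * W < J ∧ J ≤ pvCdiv J W * W := by
  have := (PySem.Int.neg_floordiv_neg_eq_iff_of_pos (a := J) (b := W) (q := pvCdiv J W) hW).mp rfl
  exact this

lemma pvScore_eq (J W : Int) (h : pvCdiv J W ≤ W) :
    pvScore J W = W * pvCdiv J W - J + (W - pvCdiv J W) := by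
  unfold pvScore; rw [abs_of_nonneg (by omega)]

lemma pvScore_eq' (J W : Int) (h : W ≤ pvCdiv J W) :
    pvScore J W = W * pvCdiv J W - J + (pvCdiv J W - W) := by
  unfold pvScore; rw [abs_of_nonpos (by omega)]; ring

lemma pvScore_one (J : Int) (hJ : 1 ≤ J) : pvScore J 1 = J - 1 := by
  have h1 : pvCdiv J 1 = J := by
    have := pvCdiv_bracket J 1 (by omega); omega
  unfold pvScore; rw [h1]; rw [abs_of_nonpos (by omega)]; ring

-- KEY: for s = isqrt J and any w ≥ s + 2, the grid with width h = ceil(J/w) scores no worse,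
-- and 1 ≤ h ≤ s, so widths beyond s + 1 never strictly improve the running best.
lemma pvScore_dominated (J s w : Int) (hJ : 1 ≤ J) (hs0 : 0 ≤ s)
    (_hs1 : s * s ≤ J) (hs2 : J < (s + 1) * (s + 1)) (hw : s + 2 ≤ w) :
    1 ≤ pvCdiv J w ∧ pvCdiv J w ≤ s ∧ pvScore J (pvCdiv J w) ≤ pvScore J w := by
  have hw0 : 0 < w := by omega
  obtain ⟨hb1, hb2⟩ := pvCdiv_bracket J w hw0
  set h := pvCdiv J w with hh
  have hh1 : 1 ≤ h := by nlinarith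
  have hhs : h ≤ s := by nlinarith
  obtain ⟨hc1, hc2⟩ := pvCdiv_bracket J h (by omega)
  set h' := pvCdiv J h with hh'
  have hge : h ≤ h' := by nlinarith
  have hle : h' ≤ w := by nlinarith
  refine ⟨hh1, hhs, ?_⟩
  rw [pvScore_eq J w (by omega), pvScore_eq' J h (by omega)]
  nlinarith [mul_nonneg (by omega : (0:Int) ≤ h + 1) (by omega : (0:Int) ≤ w - h')]

-- the running minimum never increases and bounds the score of every scanned width
lemma pvFold_min (J : Int) (L : List Int) (b : Int × Int × Int) :
    (L.foldl (pvStep J) b).2.2 ≤ b.2.2 ∧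
      ∀ w ∈ L, (L.foldl (pvStep J) b).2.2 ≤ pvScore J w := by
  induction L generalizing b with
  | nil => exact ⟨le_refl _, by simp⟩
  | cons a L ih =>
    obtain ⟨ih1, ih2⟩ := ih (pvStep J b a)
    have hstep : (pvStep J b a).2.2 ≤ b.2.2 ∧ (pvStep J b a).2.2 ≤ pvScore J a := by
      unfold pvStep; split <;> simp_all; omega
    refine ⟨le_trans ih1 hstep.1, ?_⟩
    intro w hw
    rcases List.mem_cons.mp hw with rfl | hw
    · exact le_trans ih1 hstep.2
    · exact ih2 w hw

-- folding further widths whose score is ≥ the current minimum changes nothing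
lemma pvFold_noupdate (J : Int) (L : List Int) (b : Int × Int × Int)
    (h : ∀ w ∈ L, b.2.2 ≤ pvScore J w) : L.foldl (pvStep J) b = b := by
  induction L with
  | nil => rfl
  | cons a L ih =>
    have ha : b.2.2 ≤ pvScore J a := h a (List.mem_cons_self ..)
    have hstep : pvStep J b a = b := by unfold pvStep; split <;> [omega; rfl]
    rw [List.foldl_cons, hstep]
    exact ih (fun w hw => h w (List.mem_cons_of_mem _ hw))

-- A's Option-state fold from a `some` state mirrors B's plain-triple fold
lemma pvFoldA_eq (J : Int) (L : List Int) (w h s : Int) :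
    L.foldl (pvStepA J) (some (s, w, h)) =
      some (((L.foldl (pvStep J) (w, h, s)).2.2, (L.foldl (pvStep J) (w, h, s)).1,
             (L.foldl (pvStep J) (w, h, s)).2.1)) := by
  induction L generalizing w h s with
  | nil => rfl
  | cons a L ih =>
    rw [List.foldl_cons, List.foldl_cons]
    by_cases hc : pvScore J a < s
    · have h1 : pvStepA J (some (s, w, h)) a = some (pvScore J a, a, pvCdiv J a) := by
        unfold pvStepA; simp [hc]
      have h2 : pvStep J (w, h, s) a = (a, pvCdiv J a, pvScore J a) := by
        unfold pvStep; simp [hc]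
      rw [h1, h2]; exact ih a (pvCdiv J a) (pvScore J a)
    · have h1 : pvStepA J (some (s, w, h)) a = some (s, w, h) := by
        unfold pvStepA; simp [hc]
      have h2 : pvStep J (w, h, s) a = (w, h, s) := by
        unfold pvStep; simp [hc]
      rw [h1, h2]; exact ih w h s

-- the ports' lambdas are the named step functions
lemma pvPortA_step (J : Int) :
    (fun (best : Option (Int × Int × Int)) (W : Int) =>
      let H := -(PySem.Int.floordiv (-J) W)
      let area := W * H
      let score := area - J + |W - H|
      match best with
      | none => some (score, W, H)
      | some b => if score < b.1 then some (score, W, H) else best) = pvStepA J := by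
  funext b W
  unfold pvStepA pvScore pvCdiv
  cases b <;> simp

lemma pvPortB_step (J : Int) :
    (fun (b : Int × Int × Int) (W : Int) =>
      let H := -(PySem.Int.floordiv (-J) W)
      let score := W * H - J + |W - H|
      if score < b.2.2 then (W, H, score) else b) = pvStep J := by
  funext b W
  unfold pvStep pvScore pvCdiv
  simp

-- isqrt bounds, cast to Int
lemma pvSqrt_bounds (J : Int) (hJ : 1 ≤ J) :
    0 ≤ ((Int.toNat J).sqrt : Int) ∧
      ((Int.toNat J).sqrt : Int) * ((Int.toNat J).sqrt : Int) ≤ J ∧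
      J < (((Int.toNat J).sqrt : Int) + 1) * (((Int.toNat J).sqrt : Int) + 1) := by
  have hJ' : ((Int.toNat J : Int)) = J := Int.toNat_of_nonneg (by omega)
  have h1 : (Int.toNat J).sqrt * (Int.toNat J).sqrt ≤ Int.toNat J := by
    have := Nat.sqrt_le' (Int.toNat J); nlinarith [this]
  have h2 : Int.toNat J < ((Int.toNat J).sqrt + 1) * ((Int.toNat J).sqrt + 1) := by
    have := Nat.lt_succ_sqrt' (Int.toNat J); nlinarith [this]
  refine ⟨by positivity, ?_, ?_⟩
  · calc ((Int.toNat J).sqrt : Int) * ((Int.toNat J).sqrt : Int)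
        ≤ ((Int.toNat J : Int)) := by exact_mod_cast h1
      _ = J := hJ'
  · calc J = ((Int.toNat J : Int)) := hJ'.symm
      _ < (((Int.toNat J).sqrt : Int) + 1) * (((Int.toNat J).sqrt : Int) + 1) := by
          exact_mod_cast h2

lemma pvMain (J : Int) (hJ : 1 ≤ J) : optimal_grid J = optimal_grid_alt J := by
  obtain ⟨hs0, hs1, hs2⟩ := pvSqrt_bounds J hJ
  set s : Int := ((Int.toNat J).sqrt : Int) with hsdef
  set c : Int := min J (s + 1) with hcdef
  have hs1' : 1 ≤ s := by nlinarith
  have hsJ : s ≤ J := by nlinarith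
  have hc1 : 1 ≤ c := by omega
  have hcJ : c ≤ J := by omega
  -- peel W = 1 off A's range
  have hr1 : PySem.List.pyRange 1 (J + 1) 1 = 1 :: PySem.List.pyRange 2 (J + 1) 1 := by
    have := PySem.List.pyRange_one_cons (a := 1) (b := J + 1) (by omega)
    simpa using this
  -- split A's remaining range at c + 1
  have hr2 : PySem.List.pyRange 2 (J + 1) 1 =
      PySem.List.pyRange 2 (c + 1) 1 ++ PySem.List.pyRange (c + 1) (J + 1) 1 :=
    PySem.List.pyRange_one_append 2 (c + 1) (J + 1) (by omega) (by omega)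
  -- B's fold result over the short range
  set r : Int × Int × Int :=
    (PySem.List.pyRange 2 (c + 1) 1).foldl (pvStep J) (1, J, J - 1) with hrdef
  obtain ⟨hrinit, hrmem⟩ := pvFold_min J (PySem.List.pyRange 2 (c + 1) 1) (1, J, J - 1)
  rw [← hrdef] at hrinit hrmem
  -- every width in the tail is dominated by a width already scanned
  have htail : ∀ w ∈ PySem.List.pyRange (c + 1) (J + 1) 1, r.2.2 ≤ pvScore J w := by
    intro w hw
    rw [PySem.List.mem_pyRange_one] at hw
    have hcw : c = s + 1 := by omega
    have hw2 : s + 2 ≤ w := by omega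
    obtain ⟨hh1, hh2, hh3⟩ := pvScore_dominated J s w hJ hs0 hs1 hs2 hw2
    rcases eq_or_lt_of_le hh1 with heq | hlt
    · have : r.2.2 ≤ pvScore J 1 := by
        rw [pvScore_one J hJ]; simpa using hrinit
      rw [← heq] at hh3; omega
    · have hmem : pvCdiv J w ∈ PySem.List.pyRange 2 (c + 1) 1 := by
        rw [PySem.List.mem_pyRange_one]; omega
      have := hrmem (pvCdiv J w) hmem
      omega
  -- assemble
  have hcd1 : pvCdiv J 1 = J := by have := pvCdiv_bracket J 1 (by omega); omega
  have hA1 : pvStepA J none 1 = some (J - 1, 1, J) := by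
    unfold pvStepA; rw [pvScore_one J hJ, hcd1]
  unfold optimal_grid optimal_grid_alt
  rw [pvPortA_step, pvPortB_step, hr1, hr2, List.foldl_cons, hA1, List.foldl_append,
      pvFoldA_eq J _ 1 J (J - 1), ← hrdef,
      pvFoldA_eq J _ r.1 r.2.1 r.2.2,
      show ((r.1, r.2.1, r.2.2) : Int × Int × Int) = r from rfl,
      pvFold_noupdate J _ r htail]

-- ===== VERDICT (by name: the statement is the Claim_ definition above) =====
theorem optimal_grid_spec : Claim_equal_optimal_grid := by
  intro J _ hpre
  unfold Spec_optimal_grid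
  exact pvMain J hpre
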